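-- pv_equiv track=rewrite | github.com/anshchaturvedi/advent-of-code | dday-12/sol.py | determine_if_valid
-- ===== SOURCE A (Python) =====
-- def determine_if_valid(cur_board, counts):
--     actual_counts = []
--
--     acc = 0
--     for elem in cur_board:
--         if elem == "#":
--             acc += 1
--         else:
--             if acc != 0:
--                 actual_counts.append(acc)
--                 acc = 0
--
--     if acc != 0:
--         actual_counts.append(acc)
--
--     return 1 if actual_counts == counts else 0
-- ===== SOURCE B (Python) =====
-- def determine_if_valid(cur_board, counts):
--     # two-pointer run scanner: find each maximal run, record its length if it is a '#' run
--     actual = []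
--     i, n = 0, len(cur_board)
--     while i < n:
--         j = i
--         while j < n and cur_board[j] == cur_board[i]:
--             j += 1
--         if cur_board[i] == "#":
--             actual.append(j - i)
--         i = j
--     return 1 if actual == counts else 0
-- ===== Notes on version B (the rewrite author's own statement) =====
-- stated objective: alternative
-- what changed: Replaced the accumulator state machine (with else-branch reset and post-loop flush) by a two-pointer scanner over maximal runs that appends each '#'-run length directly.
import Mathlib
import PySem

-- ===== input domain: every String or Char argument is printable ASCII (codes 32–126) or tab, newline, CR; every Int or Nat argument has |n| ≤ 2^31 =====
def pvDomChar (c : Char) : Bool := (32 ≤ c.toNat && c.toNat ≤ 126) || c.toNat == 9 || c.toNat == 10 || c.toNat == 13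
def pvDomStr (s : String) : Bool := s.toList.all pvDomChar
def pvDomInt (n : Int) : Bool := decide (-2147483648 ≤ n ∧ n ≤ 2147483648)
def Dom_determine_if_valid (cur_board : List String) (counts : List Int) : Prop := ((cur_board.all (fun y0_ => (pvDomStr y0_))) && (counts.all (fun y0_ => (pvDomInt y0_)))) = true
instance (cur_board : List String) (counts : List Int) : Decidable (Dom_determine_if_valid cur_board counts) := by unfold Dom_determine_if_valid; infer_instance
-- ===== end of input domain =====

-- B replaces A's accumulator state machine (with reset branch and post-loop flush)
-- by a two-pointer scan over maximal runs; objective: alternative decomposition, same cost.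

-- ===== PORT A =====
-- the loop body of A: state = (actual_counts, acc)
def stepA (st : List Int × Int) (elem : String) : List Int × Int :=
  if elem = "#" then (st.1, st.2 + 1)
  else if st.2 ≠ 0 then (st.1 ++ [st.2], 0) else st

def determine_if_valid (cur_board : List String) (counts : List Int) : Int :=
  let st := cur_board.foldl stepA (([] : List Int), (0 : Int))
  let actual := if st.2 ≠ 0 then st.1 ++ [st.2] else st.1
  if actual = counts then 1 else 0

-- ===== PORT B =====
-- inner while of B: length of the maximal leading run of elements equal to x, and the rest
def runLen (x : String) : List String → Nat × List String
  | [] => (0, [])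
  | y :: ys => if y = x then ((runLen x ys).1 + 1, (runLen x ys).2) else (0, y :: ys)

theorem runLen_snd_le (x : String) : ∀ xs : List String, (runLen x xs).2.length ≤ xs.length := by
  intro xs
  induction xs with
  | nil => simp [runLen]
  | cons y ys ih =>
    simp only [runLen]
    split
    · exact Nat.le_succ_of_le ih
    · simp

-- outer while of B: collect the length of every maximal '#' run
def scanRuns : List String → List Int
  | [] => []
  | x :: xs =>
    if x = "#" then (((runLen x xs).1 : Int) + 1) :: scanRuns (runLen x xs).2
    else scanRuns (runLen x xs).2
termination_by xs => xs.length
decreasing_by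
  · exact Nat.lt_succ_of_le (runLen_snd_le x xs)
  · exact Nat.lt_succ_of_le (runLen_snd_le x xs)

def determine_if_valid_alt (cur_board : List String) (counts : List Int) : Int :=
  if scanRuns cur_board = counts then 1 else 0

-- ===== PRECONDITION & SPEC =====
def Spec_determine_if_valid (cur_board : List String) (counts : List Int) (out : Int) : Prop := out = determine_if_valid_alt cur_board counts
instance (cur_board : List String) (counts : List Int) (out : Int) : Decidable (Spec_determine_if_valid cur_board counts out) := by unfold Spec_determine_if_valid; infer_instance

-- ===== CLAIM (what is proved, stated in full; the proofs are below) =====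
def Claim_equal_determine_if_valid : Prop := ∀ (cur_board : List String) (counts : List Int), Dom_determine_if_valid cur_board counts → Spec_determine_if_valid cur_board counts (determine_if_valid cur_board counts)

-- ===== LEMMAS AND PROOFS =====

-- recursive restatement of A's loop + flush
def recA : List String → Int → List Int
  | [], acc => if acc ≠ 0 then [acc] else []
  | x :: xs, acc =>
    if x = "#" then recA xs (acc + 1)
    else if acc ≠ 0 then acc :: recA xs 0 else recA xs 0

theorem foldA_recA : ∀ (xs : List String) (out : List Int) (acc : Int),
    (if (xs.foldl stepA (out, acc)).2 ≠ 0
      then (xs.foldl stepA (out, acc)).1 ++ [(xs.foldl stepA (out, acc)).2]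
      else (xs.foldl stepA (out, acc)).1) = out ++ recA xs acc := by
  intro xs
  induction xs with
  | nil => intro out acc; by_cases h : acc = 0 <;> simp [recA, h]
  | cons x xs ih =>
    intro out acc
    by_cases hx : x = "#"
    · simpa [stepA, hx, recA] using ih out (acc + 1)
    · by_cases ha : acc = 0
      · simpa [stepA, hx, ha, recA] using ih out 0
      · simpa [stepA, hx, ha, recA] using ih (out ++ [acc]) 0

-- skipping a run of non-'#' elements with acc = 0 changes nothing
theorem recA_skip (x : String) (hx : x ≠ "#") :
    ∀ xs : List String, recA (runLen x xs).2 0 = recA xs 0 := by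
  intro xs
  induction xs with
  | nil => simp [runLen]
  | cons y ys ih =>
    by_cases hy : y = x
    · have hy' : y ≠ "#" := hy ▸ hx
      simp only [runLen, if_pos hy]
      rw [ih]
      simp [recA, hy']
    · simp [runLen, hy]

theorem recA_scanRuns_aux : ∀ (n : Nat) (xs : List String), xs.length ≤ n →
    (recA xs 0 = scanRuns xs ∧
     ∀ acc : Int, 0 < acc →
       recA xs acc = (acc + ((runLen "#" xs).1 : Int)) :: scanRuns (runLen "#" xs).2) := by
  intro n
  induction n with
  | zero =>
    intro xs h
    have hxs : xs = [] := List.length_eq_zero_iff.mp (Nat.le_zero.mp h)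
    subst hxs
    refine ⟨by simp [recA, scanRuns], ?_⟩
    intro acc hacc
    simp [recA, runLen, scanRuns, hacc.ne']
  | succ n ih =>
    intro xs h
    cases xs with
    | nil =>
      refine ⟨by simp [recA, scanRuns], ?_⟩
      intro acc hacc
      simp [recA, runLen, scanRuns, hacc.ne']
    | cons x xs =>
      have hlen : xs.length ≤ n := Nat.le_of_succ_le_succ h
      constructor
      · by_cases hx : x = "#"
        · have h2 := (ih xs hlen).2 1 (by norm_num)
          subst hx
          rw [scanRuns]
          rw [show recA ("#" :: xs) 0 = recA xs 1 by simp [recA]]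
          rw [h2]
          congr 1
          ring
        · have hsub : (runLen x xs).2.length ≤ n :=
            le_trans (runLen_snd_le x xs) hlen
          have h1 := (ih (runLen x xs).2 hsub).1
          rw [scanRuns]
          simp only [if_neg hx]
          rw [show recA (x :: xs) 0 = recA xs 0 by simp [recA, hx]]
          rw [← h1, recA_skip x hx]
      · intro acc hacc
        by_cases hx : x = "#"
        · have h2 := (ih xs hlen).2 (acc + 1) (by omega)
          subst hx
          rw [show recA ("#" :: xs) acc = recA xs (acc + 1) by simp [recA]]
          rw [h2]
          simp only [runLen]
          congr 1
          push_cast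
          ring
        · have hrl : runLen "#" (x :: xs) = (0, x :: xs) := by
            simp [runLen, fun hc : x = "#" => hx hc]
          rw [show recA (x :: xs) acc = acc :: recA xs 0 by simp [recA, hx, hacc.ne']]
          rw [hrl]
          simp only []
          have hsub : (runLen x xs).2.length ≤ n :=
            le_trans (runLen_snd_le x xs) hlen
          have h1 := (ih (runLen x xs).2 hsub).1
          rw [scanRuns]
          simp only [if_neg hx]
          rw [← h1, recA_skip x hx]
          push_cast
          simp

theorem recA_eq_scanRuns (xs : List String) : recA xs 0 = scanRuns xs :=
  (recA_scanRuns_aux xs.length xs le_rfl).1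

-- ===== VERDICT (by name: the statement is the Claim_ definition above) =====
theorem determine_if_valid_spec : Claim_equal_determine_if_valid := by
  intro cur_board counts _
  unfold Spec_determine_if_valid determine_if_valid determine_if_valid_alt
  show (if (if (cur_board.foldl stepA (([] : List Int), (0 : Int))).2 ≠ 0
          then (cur_board.foldl stepA (([] : List Int), (0 : Int))).1 ++
              [(cur_board.foldl stepA (([] : List Int), (0 : Int))).2]
          else (cur_board.foldl stepA (([] : List Int), (0 : Int))).1) = counts
        then 1 else 0)
      = if scanRuns cur_board = counts then 1 else 0
  rw [foldA_recA cur_board [] 0, List.nil_append, recA_eq_scanRuns]
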